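-- pv_equiv track=rewrite | github.com/ragnvald/mesa | code/processing_setup.py | _parse_weight_line
-- ===== SOURCE A (Python) =====
-- def _parse_weight_line(text: str, default: list[int]) -> list[int]:
--     try:
--         if not text:
--             return default.copy()
--         raw = [int(x.strip()) for x in str(text).replace(";", ",").split(",") if x.strip()]
--         want = len(default)
--         cleaned = [max(1, v) for v in raw[:want]]
--         while len(cleaned) < want:
--             cleaned.append(default[len(cleaned)])
--         return cleaned
--     except Exception:
--         return default.copy()
-- ===== SOURCE B (Python) =====
-- def _parse_weight_line(text: str, default: list[int]) -> list[int]: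
--     out = default.copy()
--     if not text:
--         return out
--     i = 0
--     for piece in str(text).replace(";", ",").split(","):
--         tok = piece.strip()
--         if not tok:
--             continue
--         try:
--             v = int(tok)
--         except Exception:
--             return default.copy()
--         if i < len(out):
--             out[i] = max(1, v)
--             i += 1
--     return out
-- ===== Notes on version B (the rewrite author's own statement) =====
-- stated objective: alternative
-- what changed: Instead of A's batch pipeline (parse all tokens into a list, clamp a truncated prefix, then pad with a while-loop), B starts from a copy of default and streams over the pieces once with a write cursor, overwriting out[i] in place per valid token and parsing each token individually (bailing to default.copy() on the first bad one); no intermediate raw/cleaned lists are built.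
import Mathlib
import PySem

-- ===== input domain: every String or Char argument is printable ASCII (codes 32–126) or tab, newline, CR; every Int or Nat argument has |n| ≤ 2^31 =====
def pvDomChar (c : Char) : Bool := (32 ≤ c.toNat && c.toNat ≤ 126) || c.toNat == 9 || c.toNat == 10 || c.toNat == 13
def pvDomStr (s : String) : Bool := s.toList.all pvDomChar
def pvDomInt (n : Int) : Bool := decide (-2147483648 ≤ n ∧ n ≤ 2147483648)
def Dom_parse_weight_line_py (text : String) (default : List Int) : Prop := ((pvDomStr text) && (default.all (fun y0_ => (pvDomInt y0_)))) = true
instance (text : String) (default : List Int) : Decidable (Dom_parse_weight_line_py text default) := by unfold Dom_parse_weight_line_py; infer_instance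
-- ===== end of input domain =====

-- B replaces A's batch pipeline (parse all into 'raw', clamp a truncated prefix, pad with
-- a while-loop) by a single streaming pass with a write cursor that overwrites a copy of
-- default in place, parsing each token individually (objective: alternative; same cost).

-- ===== PORT A =====
-- the parsed tokens of the comma pieces: int(x.strip()) for each piece with truthy
-- x.strip(); none = some int() raised ValueError, caught by A's try/except
def pwlTokensOf (parts : List String) : Option (List Int) :=
  let kept := parts.filter (fun x => PySem.Str.strip x ≠ "")
  let opts := kept.map (fun x => PySem.Int.ofStr? (PySem.Str.strip x))
  if opts.all Option.isSome then some (opts.filterMap id) else none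

-- the while-loop: while len(cleaned) < want: cleaned.append(default[len(cleaned)])
def pwlPad (cleaned : List Int) (default : List Int) : List Int :=
  if h : cleaned.length < default.length then
    pwlPad (cleaned ++ [default[cleaned.length]]) default
  else cleaned
termination_by default.length - cleaned.length
decreasing_by simp; omega

def parse_weight_line_py (text : String) (default : List Int) : List Int :=
  if text = "" then default
  else
    match pwlTokensOf ((PySem.Str.replace text ";" ",").splitOn ",") with
    | none => default
    | some raw =>
      let want := default.length
      let cleaned := (raw.take want).map (fun v => max 1 v)
      pwlPad cleaned default

-- ===== PORT B =====
-- the for-loop over pieces: strip, skip empty, parse (bail to the original default on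
-- failure), and if the cursor i is still in range overwrite out[i] and advance
def pwlLoop (pieces : List String) (orig : List Int) (out : List Int) (i : Nat) : List Int :=
  match pieces with
  | [] => out
  | p :: rest =>
    let tok := PySem.Str.strip p
    if tok = "" then pwlLoop rest orig out i
    else
      match PySem.Int.ofStr? tok with
      | none => orig
      | some v =>
        if i < out.length then pwlLoop rest orig (out.set i (max 1 v)) (i + 1)
        else pwlLoop rest orig out i

def parse_weight_line_py_alt (text : String) (default : List Int) : List Int :=
  if text = "" then default
  else pwlLoop ((PySem.Str.replace text ";" ",").splitOn ",") default default 0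

-- ===== PRECONDITION & SPEC =====
def Spec_parse_weight_line_py (text : String) (default : List Int) (out : List Int) : Prop := out = parse_weight_line_py_alt text default
instance (text : String) (default : List Int) (out : List Int) : Decidable (Spec_parse_weight_line_py text default out) := by unfold Spec_parse_weight_line_py; infer_instance

-- ===== CLAIM =====
def Claim_equal_parse_weight_line_py : Prop := ∀ (text : String) (default : List Int), Dom_parse_weight_line_py text default → Spec_parse_weight_line_py text default (parse_weight_line_py text default)

-- ===== LEMMAS AND PROOFS =====

-- proof-only model of B's loop once all tokens are known valid: overwrite positions
-- i, i+1, … of out with the clamped values while in range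
def pwlWrite (out : List Int) (i : Nat) (raw : List Int) : List Int :=
  match raw with
  | [] => out
  | v :: vs =>
    if i < out.length then pwlWrite (out.set i (max 1 v)) (i + 1) vs
    else pwlWrite out i vs

theorem pwlWrite_cons_lt (out : List Int) (i : Nat) (v : Int) (vs : List Int)
    (hi : i < out.length) :
    pwlWrite out i (v :: vs) = pwlWrite (out.set i (max 1 v)) (i + 1) vs := by
  simp [pwlWrite, hi]

theorem pwlWrite_cons_ge (out : List Int) (i : Nat) (v : Int) (vs : List Int)
    (hi : ¬ i < out.length) :
    pwlWrite out i (v :: vs) = pwlWrite out i vs := by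
  simp [pwlWrite, hi]

set_option maxHeartbeats 1000000 in
theorem pwlTokensOf_nil : pwlTokensOf [] = some [] := rfl

set_option maxHeartbeats 1000000 in
theorem pwlTokensOf_cons_empty (p : String) (rest : List String)
    (h : PySem.Str.strip p = "") :
    pwlTokensOf (p :: rest) = pwlTokensOf rest := by
  unfold pwlTokensOf
  rw [List.filter_cons_of_neg (by simp [h])]

set_option maxHeartbeats 1000000 in
theorem pwlTokensOf_cons_none (p : String) (rest : List String)
    (h : PySem.Str.strip p ≠ "") (h2 : PySem.Int.ofStr? (PySem.Str.strip p) = none) :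
    pwlTokensOf (p :: rest) = none := by
  unfold pwlTokensOf
  rw [List.filter_cons_of_pos (by simp [h])]
  simp [h2]

set_option maxHeartbeats 1000000 in
theorem pwlTokensOf_cons_some (p : String) (rest : List String) (v : Int)
    (h : PySem.Str.strip p ≠ "") (h2 : PySem.Int.ofStr? (PySem.Str.strip p) = some v) :
    pwlTokensOf (p :: rest) = (pwlTokensOf rest).map (fun vs => v :: vs) := by
  unfold pwlTokensOf
  rw [List.filter_cons_of_pos (by simp [h])]
  simp only [List.map_cons, List.all_cons, h2, Option.isSome_some, Bool.true_and,
    List.filterMap_cons]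
  cases hall : (List.map (fun x => PySem.Int.ofStr? (PySem.Str.strip x))
      (List.filter (fun x => decide (PySem.Str.strip x ≠ "")) rest)).all Option.isSome with
  | true =>
    simp only [if_true, Option.map_some]
    rfl
  | false =>
    simp only [Bool.false_eq_true, if_false, Option.map_none]


theorem pwlLoop_ok (pieces : List String) (orig : List Int) (raw : List Int)
    (h : pwlTokensOf pieces = some raw) :
    ∀ (out : List Int) (i : Nat), pwlLoop pieces orig out i = pwlWrite out i raw := by
  induction pieces generalizing raw with
  | nil =>
    rw [pwlTokensOf_nil] at h
    cases h
    intro out i; rfl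
  | cons p rest ih =>
    intro out i
    by_cases hp : PySem.Str.strip p = ""
    · rw [pwlTokensOf_cons_empty p rest hp] at h
      simp only [pwlLoop, if_pos hp]
      exact ih raw h out i
    · cases h2 : PySem.Int.ofStr? (PySem.Str.strip p) with
      | none => rw [pwlTokensOf_cons_none p rest hp h2] at h; cases h
      | some v =>
        rw [pwlTokensOf_cons_some p rest v hp h2] at h
        cases hrest : pwlTokensOf rest with
        | none => rw [hrest] at h; cases h
        | some vs =>
          rw [hrest] at h
          simp only [Option.map_some] at h
          cases h
          simp only [pwlLoop, if_neg hp, h2]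
          by_cases hi : i < out.length
          · rw [if_pos hi, pwlWrite_cons_lt _ _ _ _ hi]; exact ih vs hrest _ _
          · rw [if_neg hi, pwlWrite_cons_ge _ _ _ _ hi]; exact ih vs hrest _ _

theorem pwlLoop_bad (pieces : List String) (orig : List Int)
    (h : pwlTokensOf pieces = none) :
    ∀ (out : List Int) (i : Nat), pwlLoop pieces orig out i = orig := by
  induction pieces with
  | nil => rw [pwlTokensOf_nil] at h; cases h
  | cons p rest ih =>
    intro out i
    by_cases hp : PySem.Str.strip p = ""
    · rw [pwlTokensOf_cons_empty p rest hp] at h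
      simp only [pwlLoop, if_pos hp]
      exact ih h out i
    · cases h2 : PySem.Int.ofStr? (PySem.Str.strip p) with
      | none => simp [pwlLoop, if_neg hp, h2]
      | some v =>
        rw [pwlTokensOf_cons_some p rest v hp h2] at h
        cases hrest : pwlTokensOf rest with
        | none =>
          simp only [pwlLoop, if_neg hp, h2]
          by_cases hi : i < out.length
          · rw [if_pos hi]; exact ih hrest _ _
          · rw [if_neg hi]; exact ih hrest _ _
        | some vs => rw [hrest] at h; cases h

theorem pwlWrite_length (raw : List Int) :
    ∀ (out : List Int) (i : Nat), (pwlWrite out i raw).length = out.length := by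
  induction raw with
  | nil => intro out i; rfl
  | cons v vs ih =>
    intro out i
    by_cases hi : i < out.length
    · rw [pwlWrite_cons_lt _ _ _ _ hi, ih]; simp
    · rw [pwlWrite_cons_ge _ _ _ _ hi, ih]

theorem pwlWrite_getElem (raw : List Int) :
    ∀ (out : List Int) (i j : Nat) (hj : j < out.length)
      (hj2 : j < (pwlWrite out i raw).length),
      (pwlWrite out i raw)[j] =
        if i ≤ j ∧ j - i < raw.length then
          max 1 (raw.getD (j - i) 0) else out[j] := by
  induction raw with
  | nil =>
    intro out i j hj hj2
    simp [pwlWrite]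
  | cons v vs ih =>
    intro out i j hj hj2
    by_cases hi : i < out.length
    · simp only [pwlWrite_cons_lt _ _ _ _ hi] at hj2 ⊢
      rw [ih _ _ _ (by simpa using hj) hj2]
      by_cases hji : j = i
      · subst hji
        rw [if_neg (by omega), if_pos (by simp)]
        simp
      · by_cases hc : i + 1 ≤ j ∧ j - (i + 1) < vs.length
        · rw [if_pos hc, if_pos (by constructor <;> [omega; (simp; omega)])]
          have : j - i = (j - (i + 1)) + 1 := by omega
          simp [this]
        · rw [if_neg hc, if_neg (by simp; omega)]
          rw [List.getElem_set_ne (by omega)]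
    · simp only [pwlWrite_cons_ge _ _ _ _ hi] at hj2 ⊢
      rw [ih _ _ _ hj hj2]
      rw [if_neg (by omega), if_neg (by omega)]

-- the while-loop appends exactly the defaults beyond the current length
theorem pwlPad_eq (cleaned default : List Int) :
    pwlPad cleaned default = cleaned ++ default.drop cleaned.length := by
  rw [pwlPad]
  split
  · rename_i h
    rw [pwlPad_eq (cleaned ++ [default[cleaned.length]]) default]
    simp only [List.append_assoc, List.length_append, List.length_singleton]
    congr 1
    rw [List.drop_eq_getElem_cons h]
    simp
  · rename_i h
    rw [List.drop_of_length_le (by omega)]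
    simp
termination_by default.length - cleaned.length
decreasing_by simp; omega

-- A's clamp-truncate-pad equals B's overwrite-from-zero of a default copy
theorem pwl_core (raw default : List Int) :
    pwlPad ((raw.take default.length).map (fun v => max 1 v)) default =
    pwlWrite default 0 raw := by
  rw [pwlPad_eq]
  apply List.ext_getElem
  · simp [pwlWrite_length]
  · intro j h1 h2
    rw [pwlWrite_getElem raw default 0 j
      (by rw [← pwlWrite_length raw default 0]; exact h2) h2]
    simp only [List.length_append, List.length_map, List.length_take,
      List.length_drop] at h1
    by_cases hj : j < min raw.length default.length
    · rw [List.getElem_append_left (by simp; omega)]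
      rw [if_pos (by omega)]
      simp only [List.getElem_map, List.getElem_take, Nat.sub_zero]
      rw [List.getD_eq_getElem _ _ (by omega)]
    · rw [List.getElem_append_right (by simp; omega)]
      rw [if_neg (by omega)]
      simp only [List.getElem_drop]
      congr 1
      simp
      omega

-- ===== VERDICT =====
theorem parse_weight_line_py_spec : Claim_equal_parse_weight_line_py := by
  intro text default _
  unfold Spec_parse_weight_line_py parse_weight_line_py parse_weight_line_py_alt
  split
  · rfl
  · cases h : pwlTokensOf ((PySem.Str.replace text ";" ",").splitOn ",") with
    | none => rw [pwlLoop_bad _ _ h]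
    | some raw =>
      rw [pwlLoop_ok _ _ _ h]
      exact pwl_core raw default
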